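-- pv_equiv track=rewrite | github.com/pypi-data/pypi-mirror-200 | packages/qrem/qrem-0.1.1.tar.gz/qrem-0.1.1/src/qrem/functions_qrem/functions_data_analysis2.py | convert_counts_overlapping_tomography
-- ===== SOURCE A (Python) =====
-- from typing import Dict, List
-- import copy
--
-- def add_counts_from_dictionaries(counts_dictionaries_list: List[Dict[str, int]]) -> Dict[str, int]:
--     """
--     Merge multiple counts dictionaries.
--     This is useful when you have results of multiple implementations of the same experiment.
--
--     :param counts_dictionaries_list: list of results of counts dictionaries of the form:
--                                     {'bitstring":number of measurements}
--     :return: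
--     """
--
--     # first dictionary will be template to which we will add counts
--     merged_counts = copy.deepcopy(counts_dictionaries_list[0])
--
--     # we go through all other dictionaries
--     for counts_dictionary in counts_dictionaries_list[1:]:
--         for bitstring, ticks in counts_dictionary.items():
--             if bitstring in merged_counts.keys():
--                 merged_counts[bitstring] += ticks
--             else:
--                 merged_counts[bitstring] = ticks
--
--     return merged_counts
--
-- def convert_counts_overlapping_tomography(counts_dictionary: Dict[str, Dict[str, int]],
--                                           experiment_name: str):
--     def string_cutter(circuit_name: str):
--         """
--         This function cuts the name of the circuit to the format that will later be used by
--         tomography data analyzers.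
--
--
--         :param circuit_name:
--         It assumes the following convention:
--
--         circuit_name = "experiment name" + "-" + "circuit label"+
--         "no"+ "integer identifier for multiple implementations of the same circuit"
--
--         for example the circuit can have name:
--         "DDOT-010no3"
--
--         which means that this experiment is Diagonal Detector Overlapping Tomography (DDOT),
--         the circuit implements state "010" (i.e., gates iden, X, iden on qubits 0,1,2), and
--         in the whole circuits sets this is the 4th (we start counting from 0) circuit that implements
--         that particular state.
--
--         :return:
--         """
--         experiment_string_len = len(list(experiment_name))
--         full_name_now = circuit_name[experiment_string_len + 1:]
--         new_string = ''
--         for symbol_index in range(len(full_name_now)):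
--             if full_name_now[symbol_index] + full_name_now[symbol_index + 1] == 'no':
--                 break
--             new_string += full_name_now[symbol_index]
--         return new_string
--
--     big_counts_dictionary = {}
--
--     for circuit_name, counts_dict_now in counts_dictionary.items():
--         proper_name_now = string_cutter(circuit_name)
--         if proper_name_now not in big_counts_dictionary.keys():
--             big_counts_dictionary[proper_name_now] = counts_dict_now
--         else:
--             big_counts_dictionary[proper_name_now] = add_counts_from_dictionaries(
--                 [big_counts_dictionary[proper_name_now], counts_dict_now])
--
--     return big_counts_dictionary
-- ===== SOURCE B (Python) =====
-- import copy
--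
--
-- def convert_counts_overlapping_tomography(counts_dictionary, experiment_name):
--     # Two-pass re-implementation: group the count-dicts by label first, then
--     # merge each group once.  Return value only (no argument is mutated).
--     start = len(experiment_name) + 1
--
--     def label_of(circuit_name):
--         rest = circuit_name[start:]
--         idx = rest.find('no')
--         return rest if idx < 0 else rest[:idx]
--
--     groups = {}
--     for circuit_name, counts_dict_now in counts_dictionary.items():
--         groups[label_of(circuit_name)] = groups.get(label_of(circuit_name), []) + [counts_dict_now]
--
--     big_counts_dictionary = {}
--     for label, dicts in groups.items():
--         if len(dicts) == 1:
--             big_counts_dictionary[label] = dicts[0]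
--         else:
--             merged = copy.deepcopy(dicts[0])
--             for d in dicts[1:]:
--                 for bitstring, ticks in d.items():
--                     merged[bitstring] = merged.get(bitstring, 0) + ticks
--             big_counts_dictionary[label] = merged
--     return big_counts_dictionary
-- ===== Notes on version B (the rewrite author's own statement) =====
-- stated objective: alternative
-- what changed: A merges each circuit's counts into the output dict as it scans (calling the pairwise add_counts_from_dictionaries on every repeated label) and cuts names with an index loop; B first groups the count-dicts by label in one pass, then merges each group once in a second pass, and computes the label with str.find('no') plus a slice instead of the character-by-character loop.
-- outside the precondition, e.g. on convert_counts_overlapping_tomography({'DDOT-010': {'00': 1}}, 'DDOT'): A raises IndexError, B returns {'010': {'00': 1}}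
import Mathlib
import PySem

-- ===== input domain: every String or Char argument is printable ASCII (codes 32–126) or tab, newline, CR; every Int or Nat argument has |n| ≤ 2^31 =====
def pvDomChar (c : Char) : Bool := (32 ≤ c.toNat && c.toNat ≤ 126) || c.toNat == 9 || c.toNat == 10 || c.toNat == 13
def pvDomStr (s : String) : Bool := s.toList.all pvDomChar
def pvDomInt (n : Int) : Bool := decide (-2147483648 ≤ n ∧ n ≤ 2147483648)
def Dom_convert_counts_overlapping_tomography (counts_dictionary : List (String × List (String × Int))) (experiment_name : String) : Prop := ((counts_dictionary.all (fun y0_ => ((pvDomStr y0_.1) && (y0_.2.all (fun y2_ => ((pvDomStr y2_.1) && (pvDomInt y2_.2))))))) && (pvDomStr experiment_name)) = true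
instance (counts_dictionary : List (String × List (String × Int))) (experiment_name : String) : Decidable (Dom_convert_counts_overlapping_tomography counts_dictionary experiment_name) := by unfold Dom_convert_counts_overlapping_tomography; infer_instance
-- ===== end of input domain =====

-- B replaces A's one-pass merge-as-you-go with a two-pass group-then-merge decomposition and a
-- find-based label cutter (objective: alternative decomposition, same cost). Return value only:
-- A aliases single-occurrence inner dicts, B's Python does the same; no argument is mutated.

-- ===== PORT A =====
-- string_cutter's loop: reads rest[i] and rest[i+1]; Python raises IndexError when i+1 runs
-- past the end (the one-element case below) — those inputs are excluded by Pre_.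
def pvCutA : List Char → List Char
  | [] => []
  | [c] => [c]            -- Python raises IndexError here; unreachable under Pre_
  | a :: b :: rest => if a = 'n' ∧ b = 'o' then [] else a :: pvCutA (b :: rest)

def pvStringCutter (experiment_name circuit_name : String) : String :=
  String.ofList (pvCutA (PySem.List.slice circuit_name.toList (some ((PySem.Str.len experiment_name : Int) + 1)) none))

-- add_counts_from_dictionaries: merged = deepcopy(lst[0]) (lst[0] raises on []; A only calls
-- it with two-element lists), then fold the remaining dicts' counts in.
def pvAddStep (m : PySem.Dict String Int) (p : String × Int) : PySem.Dict String Int :=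
  if m.contains p.1 then m.insert p.1 (m.getD p.1 0 + p.2) else m.insert p.1 p.2

def add_counts_from_dictionaries (lst : List (List (String × Int))) : List (String × Int) :=
  ((lst.drop 1).foldl (fun merged cnts => cnts.foldl pvAddStep merged)
    (PySem.Dict.mk (lst.headD []))).items

def convert_counts_overlapping_tomography (counts_dictionary : List (String × List (String × Int))) (experiment_name : String) : List (String × List (String × Int)) :=
  (counts_dictionary.foldl
    (fun big p =>
      let proper := pvStringCutter experiment_name p.1
      if ¬ big.contains proper then big.insert proper p.2
      else big.insert proper (add_counts_from_dictionaries [big.getD proper [], p.2]))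
    PySem.Dict.empty).items

-- ===== PORT B =====
def pvLabelCut (rest : List Char) : String :=
  if PySem.Chars.find rest ['n', 'o'] < 0 then String.ofList rest
  else String.ofList (PySem.List.slice rest none (some (PySem.Chars.find rest ['n', 'o'])))

def pvLabelOf (experiment_name circuit_name : String) : String :=
  pvLabelCut (PySem.List.slice circuit_name.toList (some ((PySem.Str.len experiment_name : Int) + 1)) none)

def pvMergeStep (m : PySem.Dict String Int) (p : String × Int) : PySem.Dict String Int :=
  m.insert p.1 (m.getD p.1 0 + p.2)

def convert_counts_overlapping_tomography_alt (counts_dictionary : List (String × List (String × Int))) (experiment_name : String) : List (String × List (String × Int)) :=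
  let groups := counts_dictionary.foldl
    (fun g p => g.insert (pvLabelOf experiment_name p.1) (g.getD (pvLabelOf experiment_name p.1) [] ++ [p.2]))
    PySem.Dict.empty
  (groups.items.foldl
    (fun big q =>
      match q.2 with
      | [] => big                          -- empty group never occurs
      | [d] => big.insert q.1 d
      | d :: rest => big.insert q.1
          ((rest.foldl (fun m c => c.foldl pvMergeStep m) (PySem.Dict.mk d)).items))
    PySem.Dict.empty).items

-- ===== PRECONDITION & SPEC =====
-- Pre_ excludes exactly the inputs where A raises IndexError: some circuit name whose tail
-- after the experiment-name prefix is nonempty but contains no 'no' marker (A's cutter loop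
-- then reads one character past the end of the string).
def pvGoodName (experiment_name circuit_name : String) : Prop :=
  circuit_name.toList.drop (experiment_name.toList.length + 1) = [] ∨
    PySem.Chars.isIn ['n', 'o'] (circuit_name.toList.drop (experiment_name.toList.length + 1)) = true

def Pre_convert_counts_overlapping_tomography (counts_dictionary : List (String × List (String × Int))) (experiment_name : String) : Prop :=
  ∀ p ∈ counts_dictionary, pvGoodName experiment_name p.1

instance (counts_dictionary : List (String × List (String × Int))) (experiment_name : String) : Decidable (Pre_convert_counts_overlapping_tomography counts_dictionary experiment_name) := by unfold Pre_convert_counts_overlapping_tomography; unfold pvGoodName; infer_instance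

def pvWitness_convert_counts_overlapping_tomography : (List (String × List (String × Int))) × String :=
  ([("DDOT-010no3", [("010", 5)])], "DDOT")

def Spec_convert_counts_overlapping_tomography (counts_dictionary : List (String × List (String × Int))) (experiment_name : String) (out : List (String × List (String × Int))) : Prop := out = convert_counts_overlapping_tomography_alt counts_dictionary experiment_name
instance (counts_dictionary : List (String × List (String × Int))) (experiment_name : String) (out : List (String × List (String × Int))) : Decidable (Spec_convert_counts_overlapping_tomography counts_dictionary experiment_name out) := by unfold Spec_convert_counts_overlapping_tomography; infer_instance

-- ===== CLAIM (what is proved, stated in full; the proofs are below) =====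
def Claim_equal_convert_counts_overlapping_tomography : Prop := ∀ (counts_dictionary : List (String × List (String × Int))) (experiment_name : String), Dom_convert_counts_overlapping_tomography counts_dictionary experiment_name → Pre_convert_counts_overlapping_tomography counts_dictionary experiment_name → Spec_convert_counts_overlapping_tomography counts_dictionary experiment_name (convert_counts_overlapping_tomography counts_dictionary experiment_name)

-- ===== LEMMAS AND PROOFS =====

abbrev pvCL := List (String × Int)

-- merging one counts-list into an accumulated counts-dict, and folding a whole group
def pvM (prev c : pvCL) : pvCL := (c.foldl pvMergeStep (PySem.Dict.mk prev)).items

def pvMergeList : List pvCL → pvCL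
  | [] => []
  | d :: rest => rest.foldl pvM d

def pvRendF (q : String × List pvCL) : String × pvCL := (q.1, pvMergeList q.2)

def pvRender (g : PySem.Dict String (List pvCL)) : PySem.Dict String pvCL :=
  PySem.Dict.mk (g.items.map pvRendF)

theorem pvAddStep_eq (m : PySem.Dict String Int) (p : String × Int) :
    pvAddStep m p = pvMergeStep m p := by
  unfold pvAddStep pvMergeStep
  cases hc : m.contains p.1
  · rw [PySem.Dict.getD_of_not_contains m 0 hc, zero_add]; simp
  · simp

theorem pvAddCounts_pair (prev c : pvCL) :
    add_counts_from_dictionaries [prev, c] = pvM prev c := by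
  unfold add_counts_from_dictionaries pvM
  have h : pvAddStep = pvMergeStep := funext fun m => funext fun p => pvAddStep_eq m p
  simp [h]

theorem pvFoldl_mergeStep_items (rest : List pvCL) (m : PySem.Dict String Int) :
    (rest.foldl (fun m c => c.foldl pvMergeStep m) m).items = rest.foldl pvM m.items := by
  induction rest generalizing m with
  | nil => rfl
  | cons c r ih => exact ih (c.foldl pvMergeStep m)

theorem pvMergeList_append (d : pvCL) (r : List pvCL) (c : pvCL) :
    pvMergeList ((d :: r) ++ [c]) = pvM (pvMergeList (d :: r)) c := by
  simp [pvMergeList, List.foldl_append]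

theorem pvGet?_mk_map {ν β : Type} (l : List (String × ν)) (f : ν → β) (k : String) :
    (PySem.Dict.mk (l.map (fun q => (q.1, f q.2)))).get? k = ((PySem.Dict.mk l).get? k).map f := by
  induction l with
  | nil => rfl
  | cons q t ih =>
      obtain ⟨a, v⟩ := q
      by_cases h : a == k
      · simp [PySem.Dict.get?_mk_cons, h]
      · simpa [PySem.Dict.get?_mk_cons, h] using ih

theorem pvGet?_render (g : PySem.Dict String (List pvCL)) (k : String) :
    (pvRender g).get? k = (g.get? k).map pvMergeList := by
  have h := pvGet?_mk_map g.items pvMergeList k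
  simpa [pvRender, pvRendF] using h

theorem pvContains_render (g : PySem.Dict String (List pvCL)) (k : String) :
    (pvRender g).contains k = g.contains k := by
  rw [PySem.Dict.contains_eq_isSome_get?, PySem.Dict.contains_eq_isSome_get?, pvGet?_render]
  cases g.get? k <;> rfl

theorem pvRender_step (g : PySem.Dict String (List pvCL)) (hne : ∀ q ∈ g.items, q.2 ≠ [])
    (lab : String) (c : pvCL) :
    (if ¬ (pvRender g).contains lab then (pvRender g).insert lab c
     else (pvRender g).insert lab (pvM ((pvRender g).getD lab []) c))
      = pvRender (g.insert lab (g.getD lab [] ++ [c])) := by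
  cases hc : g.contains lab
  · rw [if_pos (by simp [pvContains_render, hc])]
    apply PySem.Dict.ext
    rw [PySem.Dict.items_insert_of_not_contains _ _ (by rw [pvContains_render]; exact hc)]
    unfold pvRender
    rw [PySem.Dict.items_insert_of_not_contains _ _ hc,
      PySem.Dict.getD_of_not_contains g _ hc]
    simp [pvRendF, pvMergeList]
  · obtain ⟨v, hv⟩ : ∃ v, g.get? lab = some v := by
      have h := PySem.Dict.contains_eq_isSome_get? g lab
      rw [hc] at h
      exact Option.isSome_iff_exists.mp h.symm
    obtain ⟨d, r, rfl⟩ : ∃ d r, v = d :: r := by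
      cases hv' : v with
      | nil => exact absurd (hv' ▸ hv) (fun h => hne _ (PySem.Dict.mem_items_of_get?_eq_some g h) rfl)
      | cons d r => exact ⟨d, r, rfl⟩
    have hgd : g.getD lab [] = d :: r := PySem.Dict.getD_of_get?_eq_some g [] hv
    have hrd : (pvRender g).getD lab [] = pvMergeList (d :: r) := by
      rw [PySem.Dict.getD_eq_get?_getD, pvGet?_render, hv]; rfl
    rw [if_neg (by simp [pvContains_render, hc]), hrd, ← pvMergeList_append]
    apply PySem.Dict.ext
    rw [PySem.Dict.items_insert_of_contains _ _ (by rw [pvContains_render]; exact hc)]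
    unfold pvRender
    rw [PySem.Dict.items_insert_of_contains _ _ hc, hgd]
    simp only [List.map_map]
    apply List.map_congr_left
    intro p _
    by_cases hp : p.1 = lab
    · simp [pvRendF, hp]
    · simp [pvRendF, hp]

theorem pvStepG_ne (g : PySem.Dict String (List pvCL)) (hne : ∀ q ∈ g.items, q.2 ≠ [])
    (lab : String) (c : pvCL) :
    ∀ q ∈ (g.insert lab (g.getD lab [] ++ [c])).items, q.2 ≠ [] := by
  intro q hq
  rcases (PySem.Dict.mem_items_insert g _ _ q).mp hq with h | ⟨h, -⟩
  · subst h; simp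
  · exact hne q h

theorem pvMain_fold (en : String) (cd : List (String × pvCL)) :
    ∀ (g : PySem.Dict String (List pvCL)), (∀ q ∈ g.items, q.2 ≠ []) →
    cd.foldl (fun big p =>
        if ¬ big.contains (pvStringCutter en p.1) then big.insert (pvStringCutter en p.1) p.2
        else big.insert (pvStringCutter en p.1)
          (pvM (big.getD (pvStringCutter en p.1) []) p.2)) (pvRender g)
      = pvRender (cd.foldl (fun g p =>
          g.insert (pvStringCutter en p.1)
            (g.getD (pvStringCutter en p.1) [] ++ [p.2])) g) := by
  induction cd with
  | nil => intro g _; rfl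
  | cons p t ih =>
      intro g hne
      simp only [List.foldl_cons]
      rw [pvRender_step g hne]
      exact ih _ (pvStepG_ne g hne _ _)

theorem pvGroups_ne (en : String) (cd : List (String × pvCL)) :
    ∀ (g : PySem.Dict String (List pvCL)), (∀ q ∈ g.items, q.2 ≠ []) →
    ∀ q ∈ (cd.foldl (fun g p =>
        g.insert (pvStringCutter en p.1)
          (g.getD (pvStringCutter en p.1) [] ++ [p.2])) g).items, q.2 ≠ [] := by
  induction cd with
  | nil => intro g hne; exact hne
  | cons p t ih =>
      intro g hne
      simp only [List.foldl_cons]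
      exact ih _ (pvStepG_ne g hne _ _)

-- A's cutter copies characters until the first 'no'; if there is none it copies the whole
-- string (Python would raise at the last character, which Pre_ excludes, but the port then
-- returns the whole string too, so the two cutters agree on every input).
theorem pvCutA_of_not_infix (s : List Char) (h : ¬ ['n', 'o'] <:+: s) : pvCutA s = s := by
  fun_induction pvCutA s with
  | case1 => rfl
  | case2 c => rfl
  | case3 a b rest hg =>
      exact absurd (by simp [hg.1, hg.2] : ['n','o'] <+: a :: b :: rest).isInfix h
  | case4 a b rest hg ih =>
      rw [ih (fun hi => h (hi.trans (List.suffix_cons a (b :: rest)).isInfix))]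

theorem pvCutA_eq_take (s : List Char) (j : Nat)
    (hpre : ['n', 'o'] <+: s.drop j) (hmin : ∀ i, i < j → ¬ ['n', 'o'] <+: s.drop i) :
    pvCutA s = s.take j := by
  induction s generalizing j with
  | nil => simp at hpre
  | cons a t ih =>
      cases j with
      | zero =>
          rw [List.drop_zero] at hpre
          obtain ⟨ha, hb⟩ := List.cons_prefix_cons.mp hpre
          cases t with
          | nil => simp at hb
          | cons x u =>
              obtain ⟨hx, -⟩ := List.cons_prefix_cons.mp hb
              simp [pvCutA, ← ha, ← hx]
      | succ j' =>
          have h0 : ¬ ['n', 'o'] <+: a :: t := hmin 0 (Nat.succ_pos j')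
          cases t with
          | nil => simp at hpre
          | cons b u =>
              have hg : ¬ (a = 'n' ∧ b = 'o') := by
                intro ⟨ha, hb⟩; exact h0 (by simp [ha, hb])
              have hrec := ih j' (by simpa using hpre)
                (fun i hi => by simpa using hmin (i + 1) (by omega))
              simp [pvCutA, hg, hrec]

theorem pvCut_eq_cut (rest : List Char) : String.ofList (pvCutA rest) = pvLabelCut rest := by
  unfold pvLabelCut
  by_cases h : ['n', 'o'] <:+: rest
  · have hf : 0 ≤ PySem.Chars.find rest ['n', 'o'] := (PySem.Chars.find_nonneg_iff _ _).mpr h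
    obtain ⟨hp, hm⟩ := PySem.Chars.find_spec hf
    rw [if_neg (by omega), PySem.List.slice_to _ hf,
      pvCutA_eq_take rest (PySem.Chars.find rest ['n','o']).toNat hp (fun i hi => hm i hi)]
  · rw [if_pos (by rw [(PySem.Chars.find_eq_neg_one_iff rest ['n','o']).mpr h]; norm_num),
      pvCutA_of_not_infix rest h]

theorem pvCut_eq (en name : String) : pvStringCutter en name = pvLabelOf en name := by
  unfold pvStringCutter pvLabelOf
  exact pvCut_eq_cut _

-- ===== VERDICT (by name: the statement is the Claim_ definition above) =====
theorem convert_counts_overlapping_tomography_spec : Claim_equal_convert_counts_overlapping_tomography := by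
  intro cd en _ _
  unfold Spec_convert_counts_overlapping_tomography
  unfold convert_counts_overlapping_tomography convert_counts_overlapping_tomography_alt
  have hlab : pvLabelOf en = pvStringCutter en := (funext (pvCut_eq en)).symm
  simp only [hlab]
  set groups := cd.foldl (fun g p =>
      g.insert (pvStringCutter en p.1)
        (g.getD (pvStringCutter en p.1) [] ++ [p.2])) PySem.Dict.empty with hgroups
  have hempty_ne : ∀ q ∈ (PySem.Dict.empty : PySem.Dict String (List pvCL)).items, q.2 ≠ [] := by
    intro q hq; simp [PySem.Dict.empty] at hq
  have hne : ∀ q ∈ groups.items, q.2 ≠ [] := pvGroups_ne en cd PySem.Dict.empty hempty_ne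
  have hnodup : groups.keys.Nodup :=
    PySem.Dict.nodup_keys_foldl_insert_key cd (fun p => pvStringCutter en p.1) _ _
      PySem.Dict.nodup_keys_empty
  -- A's loop body is the pvM-form body
  have hA : (fun (big : PySem.Dict String pvCL) (p : String × pvCL) =>
      let proper := pvStringCutter en p.1
      if ¬ big.contains proper then big.insert proper p.2
      else big.insert proper (add_counts_from_dictionaries [big.getD proper [], p.2]))
    = (fun big p =>
      if ¬ big.contains (pvStringCutter en p.1) then big.insert (pvStringCutter en p.1) p.2
      else big.insert (pvStringCutter en p.1)
        (pvM (big.getD (pvStringCutter en p.1) []) p.2)) := by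
    funext big p
    simp only [pvAddCounts_pair]
  -- A's fold computes the rendered group dictionary
  have hmain : cd.foldl (fun big p =>
      if ¬ big.contains (pvStringCutter en p.1) then big.insert (pvStringCutter en p.1) p.2
      else big.insert (pvStringCutter en p.1)
        (pvM (big.getD (pvStringCutter en p.1) []) p.2)) PySem.Dict.empty
      = pvRender groups := pvMain_fold en cd PySem.Dict.empty hempty_ne
  rw [hA, hmain]
  -- B's second pass inserts each group's merged dict once
  have hcongr : groups.items.foldl (fun big q =>
        match q.2 with
        | [] => big
        | [d] => big.insert q.1 d
        | d :: rest => big.insert q.1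
            ((rest.foldl (fun m c => c.foldl pvMergeStep m) (PySem.Dict.mk d)).items))
        PySem.Dict.empty
      = groups.items.foldl (fun big q => big.insert q.1 (pvMergeList q.2)) PySem.Dict.empty := by
    apply PySem.List.foldl_congr_mem
    intro big q hq
    match hq2 : q.2 with
    | [] => exact absurd hq2 (hne q hq)
    | [d] => rfl
    | d :: c :: r =>
        have h := pvFoldl_mergeStep_items (c :: r) (PySem.Dict.mk d)
        simp only [h]
        rfl
  rw [hcongr]
  have hfresh : (groups.items.foldl (fun big q => big.insert q.1 (pvMergeList q.2))
        PySem.Dict.empty).items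
      = PySem.Dict.empty.items ++ groups.items.map (fun q => (q.1, pvMergeList q.2)) :=
    PySem.Dict.items_foldl_insert_fresh groups.items Prod.fst (fun q => pvMergeList q.2) _
      (fun a _ => PySem.Dict.contains_empty _) (by simpa [PySem.Dict.keys] using hnodup)
  rw [hfresh]
  rfl
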